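-- pv_equiv track=rewrite | github.com/robinovitch61/advent-of-code | 2020/19.py | gen_regex
-- ===== SOURCE A (Python) =====
-- def gen_regex(rule_set, rule_num):
--     def helper(rule_set, rule_num, memo):
--         regex = ''
--         if memo is None:
--             memo = {}
--         elif rule_num in memo:
--             return memo[rule_num]
--         rule = rule_set[rule_num]
--         if rule in ('a', 'b'):
--             memo[rule_num] = rule
--             return memo[rule_num]
--         else:
--             for num in rule.split(' '):
--                 if num == '|':
--                     regex += '|'
--                 else:
--                     if num in memo:
--                         regex += memo[num]
--                     else:
--                         res = helper(rule_set, int(num), memo)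
--                         to_add = res if res in ('a', 'b') else f"({res})"
--                         memo[num] = to_add
--                         regex += memo[num]
--             return regex
--     return helper(rule_set, rule_num, None)
-- ===== SOURCE B (Python) =====
-- def gen_regex(rule_set, rule_num):
--     def expand(n):
--         rule = rule_set[n]
--         if rule in ('a', 'b'):
--             return rule
--         parts = []
--         for tok in rule.split(' '):
--             if tok == '|':
--                 parts.append('|')
--             else:
--                 sub = expand(int(tok))
--                 parts.append(sub if sub in ('a', 'b') else '(' + sub + ')')
--         return ''.join(parts)
--     return expand(rule_num)
-- ===== Notes on version B (the rewrite author's own statement) =====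
-- stated objective: simpler
-- what changed: Dropped A's threaded memo dict (mixed int/str keys, cache-then-reread bookkeeping) in favour of a plain naive recursive expand that fetches a rule, recursively expands its numeric tokens and joins the parts; the memo is a pure cache and never changes the produced regex.
import Mathlib
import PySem

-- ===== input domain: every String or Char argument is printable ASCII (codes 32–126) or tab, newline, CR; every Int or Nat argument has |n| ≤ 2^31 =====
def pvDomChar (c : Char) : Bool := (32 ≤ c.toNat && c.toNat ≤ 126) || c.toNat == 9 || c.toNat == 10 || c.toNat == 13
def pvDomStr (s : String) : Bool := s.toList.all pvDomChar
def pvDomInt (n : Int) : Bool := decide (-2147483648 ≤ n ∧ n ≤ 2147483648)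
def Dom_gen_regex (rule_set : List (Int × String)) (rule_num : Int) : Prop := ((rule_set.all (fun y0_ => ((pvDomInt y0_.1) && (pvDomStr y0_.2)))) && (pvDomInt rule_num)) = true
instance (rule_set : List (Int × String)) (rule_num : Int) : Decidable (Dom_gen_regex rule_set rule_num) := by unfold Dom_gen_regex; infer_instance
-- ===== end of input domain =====

-- B drops A's threaded memo dict and rebuilds each sub-regex by plain naive recursion
-- (objective: simpler); the memo is a pure cache, so the returned regex is identical.

-- rule.split(' '): the separator is nonempty, so split? is always some
def pvSplitSp (rule : String) : List String := (PySem.Str.split? rule " ").getD []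

-- ===== PORT A =====
-- Python's single memo dict holds int keys (rules that are 'a'/'b') and str keys
-- (wrapped sub-regexes); the two key types never collide in one Python dict, so the
-- memo is ported as a pair of dicts.  The fuel argument only makes the recursion
-- total (none = exception or fuel exhausted): under Pre_ the recursion depth is
-- bounded by the number of rules, so fuel rule_set.length + 1 never runs out
-- (proved below).
abbrev pvMemo := PySem.Dict Int String × PySem.Dict String String

def pvHelperLoop (recur : Int → pvMemo → Option (String × pvMemo)) :
    List String → String → pvMemo → Option (String × pvMemo)
  | [], regex, memo => some (regex, memo)
  | num :: rest, regex, memo =>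
    if num = "|" then
      pvHelperLoop recur rest (regex ++ "|") memo
    else
      match memo.2.get? num with
      | some v => pvHelperLoop recur rest (regex ++ v) memo
      | none =>
        match PySem.Int.ofStr? num with        -- int(num); none = ValueError
        | none => none
        | some m =>
          match recur m memo with
          | none => none
          | some (res, memo1) =>
            let to_add := if res = "a" ∨ res = "b" then res else "(" ++ res ++ ")"
            let memo2 : pvMemo := (memo1.1, memo1.2.insert num to_add)
            pvHelperLoop recur rest (regex ++ (memo2.2.get? num).getD "") memo2

def pvHelper (d : PySem.Dict Int String) : Nat → Int → Option pvMemo → Option (String × pvMemo)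
  | 0, _, _ => none
  | fuel+1, rule_num, memoOpt =>
    let body : pvMemo → Option (String × pvMemo) := fun memo =>
      match d.get? rule_num with               -- rule_set[rule_num]; none = KeyError
      | none => none
      | some rule =>
        if rule = "a" ∨ rule = "b" then
          let memo' : pvMemo := (memo.1.insert rule_num rule, memo.2)
          some ((memo'.1.get? rule_num).getD "", memo')
        else
          pvHelperLoop (fun m mm => pvHelper d fuel m (some mm)) (pvSplitSp rule) "" memo
    match memoOpt with
    | none => body (PySem.Dict.empty, PySem.Dict.empty)   -- memo is None: memo = {}
    | some memo =>
      match memo.1.get? rule_num with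
      | some v => some (v, memo)               -- rule_num in memo: return memo[rule_num]
      | none => body memo

def gen_regex (rule_set : List (Int × String)) (rule_num : Int) : String :=
  ((pvHelper (PySem.Dict.ofList rule_set) (rule_set.length + 1) rule_num none).map (·.1)).getD ""

-- ===== PORT B =====
def pvExpandLoop (recur : Int → Option String) : List String → Option (List String)
  | [] => some []
  | tok :: rest =>
    if tok = "|" then
      (pvExpandLoop recur rest).map (fun ps => "|" :: ps)
    else
      match PySem.Int.ofStr? tok with          -- int(tok); none = ValueError
      | none => none
      | some m =>
        match recur m with
        | none => none
        | some sub =>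
          (pvExpandLoop recur rest).map (fun ps =>
            (if sub = "a" ∨ sub = "b" then sub else "(" ++ sub ++ ")") :: ps)

def pvExpand (d : PySem.Dict Int String) : Nat → Int → Option String
  | 0, _ => none
  | fuel+1, n =>
    match d.get? n with                        -- rule_set[n]; none = KeyError
    | none => none
    | some rule =>
      if rule = "a" ∨ rule = "b" then some rule
      else (pvExpandLoop (pvExpand d fuel) (pvSplitSp rule)).map (PySem.Str.join "")

def gen_regex_alt (rule_set : List (Int × String)) (rule_num : Int) : String :=
  (pvExpand (PySem.Dict.ofList rule_set) (rule_set.length + 1) rule_num).getD ""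

-- ===== PRECONDITION & SPEC =====
-- helpers for Pre_: the reference graph of the rule set
def pvSuccs (d : PySem.Dict Int String) (k : Int) : List Int :=
  match d.get? k with
  | none => []
  | some rule =>
    if rule = "a" ∨ rule = "b" then []
    else (pvSplitSp rule).filterMap (fun t => if t = "|" then none else PySem.Int.ofStr? t)

def pvWfB (d : PySem.Dict Int String) (k : Int) : Bool :=
  match d.get? k with
  | none => false
  | some rule =>
    (rule == "a" || rule == "b") ||
    (pvSplitSp rule).all (fun t =>
      t == "|" || (match PySem.Int.ofStr? t with
                   | some m => (d.get? m).isSome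
                   | none => false))

def pvStep (d : PySem.Dict Int String) (S : List Int) : List Int :=
  PySem.List.dedup (S ++ S.flatMap (pvSuccs d))

def pvIter (d : PySem.Dict Int String) : Nat → List Int → List Int
  | 0, S => S
  | n+1, S => pvIter d n (pvStep d S)

-- Pre_: exactly the inputs on which the Python A returns normally — the start rule
-- exists, every reachable rule is well-formed ('a'/'b', or each space-token is '|' or
-- an int literal naming an existing rule), and no reachable rule can reach itself;
-- otherwise Python raises KeyError / ValueError / RecursionError.
def Pre_gen_regex (rule_set : List (Int × String)) (rule_num : Int) : Prop :=
  (let d := PySem.Dict.ofList rule_set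
   let B := rule_set.length + 1
   ((d.get? rule_num).isSome &&
    (pvIter d B [rule_num]).all (fun k =>
      pvWfB d k && !((pvIter d B (pvSuccs d k)).contains k))) = true)

instance (rule_set : List (Int × String)) (rule_num : Int) : Decidable (Pre_gen_regex rule_set rule_num) := by
  unfold Pre_gen_regex; infer_instance

def pvWitness_gen_regex : (List (Int × String)) × Int := ([(0, "1 2 | 2 1"), (1, "a"), (2, "b")], 0)

def Spec_gen_regex (rule_set : List (Int × String)) (rule_num : Int) (out : String) : Prop := out = gen_regex_alt rule_set rule_num
instance (rule_set : List (Int × String)) (rule_num : Int) (out : String) : Decidable (Spec_gen_regex rule_set rule_num out) := by unfold Spec_gen_regex; infer_instance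

-- ===== CLAIM (what is proved, stated in full; the proofs are below) =====
def Claim_equal_gen_regex : Prop := ∀ (rule_set : List (Int × String)) (rule_num : Int), Dom_gen_regex rule_set rule_num → Pre_gen_regex rule_set rule_num → Spec_gen_regex rule_set rule_num (gen_regex rule_set rule_num)

-- ===== LEMMAS AND PROOFS =====

-- strings
theorem pvStr_ext (s t : String) (h : s.toList = t.toList) : s = t := String.toList_injective h

theorem pvJoin_nil : PySem.Str.join "" [] = "" := by decide

theorem pvJoin_cons (p : String) (ps : List String) :
    PySem.Str.join "" (p :: ps) = p ++ PySem.Str.join "" ps := by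
  apply pvStr_ext
  cases ps with
  | nil => simp [PySem.Str.join, PySem.Chars.join, List.intercalate]
  | cons q qs => simp [PySem.Str.join, PySem.Chars.join_cons_cons]

theorem pvStr_append_assoc (a b c : String) : a ++ b ++ c = a ++ (b ++ c) := by
  apply pvStr_ext; simp

theorem pvStr_empty_append (s : String) : "" ++ s = s := by
  apply pvStr_ext; simp

-- monotonicity of B's recursion in the fuel
theorem pvExpandLoop_mono (A B : Int → Option String)
    (h : ∀ n r, A n = some r → B n = some r) :
    ∀ ts ps, pvExpandLoop A ts = some ps → pvExpandLoop B ts = some ps := by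
  intro ts
  induction ts with
  | nil => intro ps hp; simpa [pvExpandLoop] using hp
  | cons t rest ih =>
    intro ps hp
    simp only [pvExpandLoop] at hp ⊢
    by_cases ht : t = "|"
    · rw [if_pos ht] at hp ⊢
      cases hr : pvExpandLoop A rest with
      | none => simp [hr] at hp
      | some qs => simp only [hr] at hp; simp only [ih qs hr]; exact hp
    · rw [if_neg ht] at hp ⊢
      cases hof : PySem.Int.ofStr? t with
      | none => simp [hof] at hp
      | some m =>
        simp only [hof] at hp ⊢
        cases hA : A m with
        | none => simp [hA] at hp
        | some sub =>
          simp only [hA] at hp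
          simp only [h m sub hA]
          cases hr : pvExpandLoop A rest with
          | none => simp [hr] at hp
          | some qs => simp only [hr] at hp; simp only [ih qs hr]; exact hp

theorem pvExpand_mono (d : PySem.Dict Int String) :
    ∀ f g, f ≤ g → ∀ n r, pvExpand d f n = some r → pvExpand d g n = some r := by
  intro f
  induction f with
  | zero => intro g _ n r hp; simp [pvExpand] at hp
  | succ f ih =>
    intro g hfg n r hp
    obtain ⟨g', rfl⟩ : ∃ g', g = g' + 1 := ⟨g - 1, by omega⟩
    simp only [pvExpand] at hp ⊢
    cases hd : d.get? n with
    | none => simp [hd] at hp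
    | some rule =>
      simp only [hd] at hp ⊢
      by_cases hab : rule = "a" ∨ rule = "b"
      · rw [if_pos hab] at hp ⊢; exact hp
      · rw [if_neg hab] at hp ⊢
        cases hl : pvExpandLoop (pvExpand d f) (pvSplitSp rule) with
        | none => simp [hl] at hp
        | some ps =>
          simp only [hl] at hp
          simp only [pvExpandLoop_mono (pvExpand d f) (pvExpand d g')
                (fun n r => ih g' (by omega) n r) _ ps hl]
          exact hp

-- the "true value" of a rule: the result of B's recursion with any sufficient fuel
def pvTV (d : PySem.Dict Int String) (n : Int) (r : String) : Prop :=
  ∃ f, pvExpand d f n = some r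

theorem pvTV_det (d : PySem.Dict Int String) (n : Int) (r s : String)
    (h1 : pvTV d n r) (h2 : pvTV d n s) : r = s := by
  obtain ⟨f1, h1⟩ := h1
  obtain ⟨f2, h2⟩ := h2
  have e1 := pvExpand_mono d f1 (max f1 f2) (le_max_left _ _) n r h1
  have e2 := pvExpand_mono d f2 (max f1 f2) (le_max_right _ _) n s h2
  rw [e1] at e2
  exact (Option.some_inj.mp e2)

def pvWrapS (r : String) : String := if r = "a" ∨ r = "b" then r else "(" ++ r ++ ")"

-- invariant of A's memo: every cached entry is the true value of its rule
def pvInv (d : PySem.Dict Int String) (memo : pvMemo) : Prop :=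
  (∀ k v, memo.1.get? k = some v → d.get? k = some v ∧ (v = "a" ∨ v = "b")) ∧
  (∀ s v, memo.2.get? s = some v →
     ∃ m r, PySem.Int.ofStr? s = some m ∧ pvTV d m r ∧ v = pvWrapS r)

theorem pvInv_empty (d : PySem.Dict Int String) :
    pvInv d (PySem.Dict.empty, PySem.Dict.empty) := by
  constructor
  · intro k v hv; simp [PySem.Dict.get?_empty] at hv
  · intro s v hv; simp [PySem.Dict.get?_empty] at hv

-- A's helper returns B's value and preserves the memo invariant
theorem pvAB (d : PySem.Dict Int String) :
    ∀ f n memoOpt r, pvInv d (memoOpt.getD (PySem.Dict.empty, PySem.Dict.empty)) →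
      pvExpand d f n = some r →
      ∃ memo', pvHelper d f n memoOpt = some (r, memo') ∧ pvInv d memo' := by
  intro f
  induction f with
  | zero => intro n memoOpt r _ hp; simp [pvExpand] at hp
  | succ f ih =>
    intro n memoOpt r hinv hp
    simp only [pvExpand] at hp
    cases hd : d.get? n with
    | none => simp [hd] at hp
    | some rule =>
      simp only [hd] at hp
      by_cases hab : rule = "a" ∨ rule = "b"
      · rw [if_pos hab] at hp
        have hr : rule = r := Option.some_inj.mp hp
        subst hr
        cases memoOpt with
        | none =>
          refine ⟨((PySem.Dict.empty : PySem.Dict Int String).insert n rule,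
                   (PySem.Dict.empty : PySem.Dict String String)), ?_, ?_⟩
          · simp only [pvHelper]
            simp only [hd]
            rw [if_pos hab]
            simp [PySem.Dict.get?_insert_self]
          · constructor
            · intro k v hv
              rw [PySem.Dict.get?_insert] at hv
              by_cases hk : k = n
              · rw [if_pos hk] at hv
                obtain rfl : rule = v := Option.some_inj.mp hv
                subst hk
                exact ⟨hd, hab⟩
              · rw [if_neg hk] at hv
                simp [PySem.Dict.get?_empty] at hv
            · intro s v hv; simp [PySem.Dict.get?_empty] at hv
        | some memo =>
          have hmv : pvInv d memo := hinv
          cases hm : memo.1.get? n with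
          | some v =>
            have hv := hmv.1 n v hm
            rw [hd] at hv
            obtain rfl : rule = v := Option.some_inj.mp hv.1
            refine ⟨memo, ?_, hmv⟩
            simp only [pvHelper]
            simp only [hm]
          | none =>
            refine ⟨(memo.1.insert n rule, memo.2), ?_, ?_⟩
            · simp only [pvHelper]
              simp only [hm, hd]
              rw [if_pos hab]
              simp [PySem.Dict.get?_insert_self]
            · constructor
              · intro k v hv
                rw [PySem.Dict.get?_insert] at hv
                by_cases hk : k = n
                · rw [if_pos hk] at hv
                  obtain rfl : rule = v := Option.some_inj.mp hv
                  subst hk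
                  exact ⟨hd, hab⟩
                · rw [if_neg hk] at hv
                  exact hmv.1 k v hv
              · exact hmv.2
      · rw [if_neg hab] at hp
        cases hl : pvExpandLoop (pvExpand d f) (pvSplitSp rule) with
        | none => simp [hl] at hp
        | some ps =>
          simp only [hl] at hp
          have hr : PySem.Str.join "" ps = r := by simpa using hp
          subst hr
          have hloop : ∀ (ts : List String) (memo : pvMemo) (acc : String) (ps : List String),
              pvInv d memo →
              pvExpandLoop (pvExpand d f) ts = some ps →
              ∃ memo', pvHelperLoop (fun m mm => pvHelper d f m (some mm)) ts acc memo
                       = some (acc ++ PySem.Str.join "" ps, memo') ∧ pvInv d memo' := by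
            intro ts
            induction ts with
            | nil =>
              intro memo acc ps hmv hpe
              have hps : ([] : List String) = ps := by simpa [pvExpandLoop] using hpe
              subst hps
              exact ⟨memo, by simp [pvHelperLoop, pvJoin_nil], hmv⟩
            | cons t rest ihts =>
              intro memo acc ps hmv hpe
              simp only [pvExpandLoop] at hpe
              by_cases ht : t = "|"
              · rw [if_pos ht] at hpe
                cases hrest : pvExpandLoop (pvExpand d f) rest with
                | none => simp [hrest] at hpe
                | some qs =>
                  simp only [hrest] at hpe
                  have hps : "|" :: qs = ps := by simpa using hpe
                  subst hps
                  obtain ⟨memo', hrun, hinv'⟩ := ihts memo (acc ++ "|") qs hmv hrest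
                  refine ⟨memo', ?_, hinv'⟩
                  simp only [pvHelperLoop]
                  rw [if_pos ht, hrun, pvJoin_cons, ← pvStr_append_assoc]
              · rw [if_neg ht] at hpe
                cases hof : PySem.Int.ofStr? t with
                | none => simp [hof] at hpe
                | some m =>
                  simp only [hof] at hpe
                  cases hsub : pvExpand d f m with
                  | none => simp [hsub] at hpe
                  | some sub =>
                    simp only [hsub] at hpe
                    cases hrest : pvExpandLoop (pvExpand d f) rest with
                    | none => simp [hrest] at hpe
                    | some qs =>
                      simp only [hrest] at hpe
                      have hps : pvWrapS sub :: qs = ps := by simpa [pvWrapS] using hpe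
                      subst hps
                      cases hc : memo.2.get? t with
                      | some v =>
                        obtain ⟨m0, r0, hof0, htv0, hv0⟩ := hmv.2 t v hc
                        have hm0 : m0 = m := by
                          rw [hof] at hof0; exact Option.some_inj.mp hof0.symm
                        subst hm0
                        have hr0 : r0 = sub := pvTV_det d m0 r0 sub htv0 ⟨f, hsub⟩
                        subst hr0
                        obtain ⟨memo', hrun, hinv'⟩ := ihts memo (acc ++ v) qs hmv hrest
                        refine ⟨memo', ?_, hinv'⟩
                        simp only [pvHelperLoop]
                        rw [if_neg ht]
                        simp only [hc]
                        rw [hrun, hv0, pvJoin_cons, ← pvStr_append_assoc]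
                      | none =>
                        obtain ⟨memo1, hrun1, hinv1⟩ := ih m (some memo) sub hmv hsub
                        have hinv2 : pvInv d (memo1.1, memo1.2.insert t (pvWrapS sub)) := by
                          constructor
                          · exact hinv1.1
                          · intro s v hv
                            rw [PySem.Dict.get?_insert] at hv
                            by_cases hs : s = t
                            · rw [if_pos hs] at hv
                              obtain rfl : pvWrapS sub = v := Option.some_inj.mp hv
                              exact ⟨m, sub, hs ▸ hof, ⟨f, hsub⟩, rfl⟩
                            · rw [if_neg hs] at hv
                              exact hinv1.2 s v hv
                        obtain ⟨memo', hrun, hinv'⟩ :=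
                          ihts (memo1.1, memo1.2.insert t (pvWrapS sub))
                               (acc ++ pvWrapS sub) qs hinv2 hrest
                        refine ⟨memo', ?_, hinv'⟩
                        simp only [pvHelperLoop]
                        rw [if_neg ht]
                        simp only [hc, hof, hrun1]
                        have hwrap : (if sub = "a" ∨ sub = "b" then sub
                                      else "(" ++ sub ++ ")") = pvWrapS sub := rfl
                        rw [hwrap, PySem.Dict.get?_insert_self]
                        simp only [Option.getD_some]
                        rw [hrun, pvJoin_cons, ← pvStr_append_assoc]
          cases memoOpt with
          | none =>
            obtain ⟨memo', hrun, hinv'⟩ :=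
              hloop (pvSplitSp rule) (PySem.Dict.empty, PySem.Dict.empty) "" ps
                (pvInv_empty d) hl
            refine ⟨memo', ?_, hinv'⟩
            simp only [pvHelper]
            simp only [hd]
            rw [if_neg hab, hrun, pvStr_empty_append]
          | some memo =>
            have hmv : pvInv d memo := hinv
            cases hm : memo.1.get? n with
            | some v =>
              have hv := hmv.1 n v hm
              rw [hd] at hv
              obtain rfl : rule = v := Option.some_inj.mp hv.1
              exact absurd hv.2 hab
            | none =>
              obtain ⟨memo', hrun, hinv'⟩ := hloop (pvSplitSp rule) memo "" ps hmv hl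
              refine ⟨memo', ?_, hinv'⟩
              simp only [pvHelper]
              simp only [hm, hd]
              rw [if_neg hab, hrun, pvStr_empty_append]

-- graph lemmas
theorem pvMem_step (d : PySem.Dict Int String) (S : List Int) (x : Int) :
    x ∈ pvStep d S ↔ x ∈ S ∨ ∃ k ∈ S, x ∈ pvSuccs d k := by
  simp [pvStep, List.mem_flatMap]

theorem pvIter_succ' (d : PySem.Dict Int String) (n : Nat) (S : List Int) :
    pvIter d (n+1) S = pvStep d (pvIter d n S) := by
  induction n generalizing S with
  | zero => rfl
  | succ n ih => exact ih (pvStep d S)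

theorem pvStep_mono (d : PySem.Dict Int String) (S T : List Int)
    (h : ∀ x ∈ S, x ∈ T) : ∀ x ∈ pvStep d S, x ∈ pvStep d T := by
  intro x hx
  rw [pvMem_step] at hx ⊢
  rcases hx with hx | ⟨k, hk, hxk⟩
  · exact Or.inl (h x hx)
  · exact Or.inr ⟨k, h k hk, hxk⟩

theorem pvSubset_step (d : PySem.Dict Int String) (S : List Int) :
    ∀ x ∈ S, x ∈ pvStep d S := by
  intro x hx; rw [pvMem_step]; exact Or.inl hx

theorem pvIter_mono (d : PySem.Dict Int String) (n : Nat) (S T : List Int)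
    (h : ∀ x ∈ S, x ∈ T) : ∀ x ∈ pvIter d n S, x ∈ pvIter d n T := by
  induction n generalizing S T with
  | zero => exact h
  | succ n ih => exact ih (pvStep d S) (pvStep d T) (pvStep_mono d S T h)

theorem pvSubset_iter (d : PySem.Dict Int String) (n : Nat) (S : List Int) :
    ∀ x ∈ S, x ∈ pvIter d n S := by
  induction n generalizing S with
  | zero => intro x hx; exact hx
  | succ n ih => intro x hx; exact ih (pvStep d S) x (pvSubset_step d S x hx)

theorem pvIter_le (d : PySem.Dict Int String) (m n : Nat) (h : m ≤ n) (S : List Int) :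
    ∀ x ∈ pvIter d m S, x ∈ pvIter d n S := by
  induction n with
  | zero => intro x hx; have : m = 0 := by omega
            subst this; exact hx
  | succ n ih =>
    intro x hx
    rcases Nat.lt_or_ge m (n+1) with hm | hm
    · rw [pvIter_succ']
      exact pvSubset_step d _ x (ih (by omega) x hx)
    · have : m = n + 1 := by omega
      subst this; exact hx

def pvClosed (d : PySem.Dict Int String) (R : List Int) : Prop :=
  ∀ k ∈ R, ∀ m ∈ pvSuccs d k, m ∈ R

theorem pvIter_of_closed (d : PySem.Dict Int String) (n : Nat) (S : List Int)
    (h : ∀ x ∈ pvStep d S, x ∈ S) : ∀ x ∈ pvIter d n S, x ∈ S := by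
  induction n with
  | zero => intro x hx; exact hx
  | succ n ih =>
    intro x hx
    rw [pvIter_succ', pvMem_step] at hx
    rcases hx with hx | ⟨k, hk, hxk⟩
    · exact ih x hx
    · have hkS := ih k hk
      exact h x ((pvMem_step d S x).mpr (Or.inr ⟨k, hkS, hxk⟩))

theorem pvIter_add (d : PySem.Dict Int String) (a b : Nat) (S : List Int) :
    pvIter d (a + b) S = pvIter d b (pvIter d a S) := by
  induction a generalizing S with
  | zero => rw [Nat.zero_add]; rfl
  | succ a ih =>
    have h1 : a + 1 + b = (a + b) + 1 := by omega
    rw [h1]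
    exact ih (pvStep d S)

-- stabilization: if every iterate lies in a finite key set of card ≤ N,
-- then after N+1 steps the iterate is closed under pvSuccs
theorem pvIter_closed (d : PySem.Dict Int String) (N : Nat) (S0 : List Int)
    (K : Finset Int) (hK : K.card ≤ N)
    (hin : ∀ i, i ≤ N + 1 → ∀ x ∈ pvIter d i S0, x ∈ K) :
    pvClosed d (pvIter d (N+1) S0) := by
  by_cases hex : ∃ i, i ≤ N ∧ ∀ x, x ∈ pvIter d (i+1) S0 ↔ x ∈ pvIter d i S0
  · obtain ⟨i, hiN, heq⟩ := hex
    have hstepfix : ∀ x ∈ pvStep d (pvIter d i S0), x ∈ pvIter d i S0 := by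
      intro x hx
      exact (heq x).mp (by rw [pvIter_succ']; exact hx)
    have hdecomp := pvIter_add d i (N+1-i) S0
    have hni : i + (N+1-i) = N+1 := by omega
    rw [hni] at hdecomp
    have hiter : ∀ x ∈ pvIter d (N+1) S0, x ∈ pvIter d i S0 := by
      intro x hx
      rw [hdecomp] at hx
      exact pvIter_of_closed d _ _ hstepfix x hx
    intro k hk m hm
    have hk' := hiter k hk
    have hmem : m ∈ pvStep d (pvIter d i S0) :=
      (pvMem_step d _ m).mpr (Or.inr ⟨k, hk', hm⟩)
    exact pvIter_le d i (N+1) (by omega) S0 m (hstepfix m hmem)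
  · exfalso
    have hex' : ∀ i, i ≤ N → ¬ ∀ x, (x ∈ pvIter d (i+1) S0 ↔ x ∈ pvIter d i S0) :=
      fun i hi hiff => hex ⟨i, hi, hiff⟩
    have hgrow : ∀ i, i ≤ N →
        ((pvIter d i S0).toFinset) ⊂ ((pvIter d (i+1) S0).toFinset) := by
      intro i hi
      have hsub : (pvIter d i S0).toFinset ⊆ (pvIter d (i+1) S0).toFinset := by
        intro y hy
        exact List.mem_toFinset.mpr
          (pvIter_le d i (i+1) (by omega) S0 y (List.mem_toFinset.mp hy))
      rw [Finset.ssubset_iff_of_subset hsub]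
      obtain ⟨x, hxne⟩ := not_forall.mp (hex' i hi)
      have h1 : x ∈ pvIter d (i+1) S0 ∧ x ∉ pvIter d i S0 := by
        by_cases h2 : x ∈ pvIter d i S0
        · exact absurd ⟨fun _ => h2, fun h => pvIter_le d i (i+1) (by omega) S0 x h⟩ hxne
        · refine ⟨?_, h2⟩
          by_contra h3
          exact hxne ⟨fun h4 => absurd h4 h3, fun h4 => absurd h4 h2⟩
      exact ⟨x, List.mem_toFinset.mpr h1.1, fun hc => h1.2 (List.mem_toFinset.mp hc)⟩
    have hcard : ∀ i, i ≤ N+1 → i ≤ ((pvIter d i S0).toFinset).card := by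
      intro i
      induction i with
      | zero => intro _; exact Nat.zero_le _
      | succ i ihc =>
        intro hi
        have h1 := ihc (by omega)
        have h2 := Finset.card_lt_card (hgrow i (by omega))
        omega
    have hKc : ((pvIter d (N+1) S0).toFinset).card ≤ K.card :=
      Finset.card_le_card (fun x hx => hin (N+1) le_rfl x (List.mem_toFinset.mp hx))
    have hK2 := hcard (N+1) le_rfl
    omega

-- keys of the dict built from the list
theorem pvGet?_ofList_mem (rs : List (Int × String)) (k : Int) (v : String)
    (h : (PySem.Dict.ofList rs).get? k = some v) : k ∈ rs.map Prod.fst := by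
  have aux : ∀ (l : List (Int × String)) (d0 : PySem.Dict Int String) (k : Int) (v : String),
      (l.foldl (fun d p => d.insert p.1 p.2) d0).get? k = some v →
      k ∈ l.map Prod.fst ∨ d0.get? k = some v := by
    intro l
    induction l with
    | nil => intro d0 k v hv; exact Or.inr hv
    | cons p rest ih =>
      intro d0 k v hv
      rcases ih (d0.insert p.1 p.2) k v hv with hmem | hget
      · exact Or.inl (List.mem_cons_of_mem _ hmem)
      · by_cases hk : k = p.1
        · exact Or.inl (by subst hk; exact List.mem_cons_self ..)
        · rw [PySem.Dict.get?_insert] at hget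
          rw [if_neg hk] at hget
          exact Or.inr hget
  have hof : PySem.Dict.ofList rs = rs.foldl (fun d p => d.insert p.1 p.2) PySem.Dict.empty := rfl
  rw [hof] at h
  rcases aux rs PySem.Dict.empty k v h with hm | hg
  · exact hm
  · simp [PySem.Dict.get?_empty] at hg

-- termination of B under Pre_
theorem pvExpandLoop_isSome (d : PySem.Dict Int String) (f : Nat) :
    ∀ ts : List String,
      (∀ t ∈ ts, t = "|" ∨ ∃ m, PySem.Int.ofStr? t = some m ∧ (pvExpand d f m).isSome) →
      (pvExpandLoop (pvExpand d f) ts).isSome := by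
  intro ts
  induction ts with
  | nil => intro _; simp [pvExpandLoop]
  | cons t rest ih =>
    intro h
    have hrest := ih (fun t ht => h t (List.mem_cons_of_mem _ ht))
    simp only [pvExpandLoop]
    by_cases ht : t = "|"
    · rw [if_pos ht]
      simpa using hrest
    · rcases h t List.mem_cons_self with h1 | ⟨m, hof, hsome⟩
      · exact absurd h1 ht
      · rw [if_neg ht]
        simp only [hof]
        obtain ⟨sub, hsub⟩ := Option.isSome_iff_exists.mp hsome
        simp only [hsub]
        simpa using hrest

theorem pvExpand_total_aux (d : PySem.Dict Int String) (N : Nat) (K : Finset Int)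
    (hKcard : K.card ≤ N)
    (hkeyK : ∀ k v, d.get? k = some v → k ∈ K)
    (start : Int)
    (hwf : ∀ k ∈ pvIter d (N+1) [start], pvWfB d k = true)
    (hacyc : ∀ k ∈ pvIter d (N+1) [start], k ∉ pvIter d (N+1) (pvSuccs d k)) :
    (pvExpand d (N+1) start).isSome := by
  have hkeys : ∀ k ∈ pvIter d (N+1) [start], k ∈ K := by
    intro k hk
    have hw := hwf k hk
    unfold pvWfB at hw
    cases hg : d.get? k with
    | none => simp [hg] at hw
    | some v => exact hkeyK k v hg
  have hin : ∀ i, i ≤ N + 1 → ∀ x ∈ pvIter d i [start], x ∈ K := by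
    intro i hi x hx
    exact hkeys x (pvIter_le d i (N+1) hi _ x hx)
  have hRclosed : pvClosed d (pvIter d (N+1) [start]) :=
    pvIter_closed d N [start] K hKcard hin
  have hRstep : ∀ x ∈ pvStep d (pvIter d (N+1) [start]), x ∈ pvIter d (N+1) [start] := by
    intro x hx
    rcases (pvMem_step d _ x).mp hx with h1 | ⟨k, hk, hxk⟩
    · exact h1
    · exact hRclosed k hk x hxk
  have hTsub : ∀ k ∈ pvIter d (N+1) [start],
      ∀ x ∈ pvIter d (N+1) (pvSuccs d k), x ∈ pvIter d (N+1) [start] := by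
    intro k hk x hx
    have h1 : ∀ y ∈ pvSuccs d k, y ∈ pvIter d (N+1) [start] :=
      fun y hy => hRclosed k hk y hy
    exact pvIter_of_closed d (N+1) _ hRstep x (pvIter_mono d (N+1) _ _ h1 x hx)
  have hTclosed : ∀ k ∈ pvIter d (N+1) [start], pvClosed d (pvIter d (N+1) (pvSuccs d k)) := by
    intro k hk
    exact pvIter_closed d N (pvSuccs d k) K hKcard
      (fun i hi x hx => hkeys x (hTsub k hk x (pvIter_le d i (N+1) hi _ x hx)))
  have main : ∀ (fuel : Nat) (seen : List Int) (n : Int),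
      n ∈ pvIter d (N+1) [start] →
      (∀ k ∈ seen, k ∈ pvIter d (N+1) [start]) →
      seen.Nodup →
      (∀ k ∈ seen, n ∈ pvIter d (N+1) (pvSuccs d k)) →
      N + 1 ≤ fuel + seen.length →
      (pvExpand d fuel n).isSome := by
    intro fuel
    induction fuel with
    | zero =>
      intro seen n hnR hseenR hnd htr hlen
      exfalso
      have hsub : seen.toFinset ⊆ K :=
        fun x hx => hkeys x (hseenR x (List.mem_toFinset.mp hx))
      have h1 : seen.length ≤ K.card := by
        rw [← List.toFinset_card_of_nodup hnd]
        exact Finset.card_le_card hsub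
      omega
    | succ fuel ih =>
      intro seen n hnR hseenR hnd htr hlen
      have hw := hwf n hnR
      unfold pvWfB at hw
      simp only [pvExpand]
      cases hg : d.get? n with
      | none => simp [hg] at hw
      | some rule =>
        simp only [hg] at hw ⊢
        by_cases hab : rule = "a" ∨ rule = "b"
        · rw [if_pos hab]; rfl
        · rw [if_neg hab]
          rw [Option.isSome_map]
          apply pvExpandLoop_isSome
          intro t ht
          by_cases htb : t = "|"
          · exact Or.inl htb
          · have hor : (rule == "a" || rule == "b") = false := by
              obtain ⟨ha, hb⟩ := not_or.mp hab
              simp [ha, hb]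
            rw [hor, Bool.false_or, List.all_eq_true] at hw
            have htt := hw t ht
            have htb' : (t == "|") = false := by simp [htb]
            rw [htb', Bool.false_or] at htt
            cases hof : PySem.Int.ofStr? t with
            | none => simp [hof] at htt
            | some m =>
              simp only [hof] at htt
              refine Or.inr ⟨m, rfl, ?_⟩
              have hmsucc : m ∈ pvSuccs d n := by
                unfold pvSuccs
                simp only [hg]
                rw [if_neg hab]
                exact List.mem_filterMap.mpr ⟨t, ht, by rw [if_neg htb]; exact hof⟩
              have hmR : m ∈ pvIter d (N+1) [start] := hRclosed n hnR m hmsucc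
              have hnseen : n ∉ seen := fun hns => hacyc n hnR (htr n hns)
              apply ih (n :: seen) m hmR
              · intro k hk
                rcases List.mem_cons.mp hk with rfl | hk'
                · exact hnR
                · exact hseenR k hk'
              · exact List.nodup_cons.mpr ⟨hnseen, hnd⟩
              · intro k hk
                rcases List.mem_cons.mp hk with rfl | hk'
                · exact pvSubset_iter d (N+1) _ m hmsucc
                · exact hTclosed k (hseenR k hk') n (htr k hk') m hmsucc
              · simp only [List.length_cons]; omega
  have hstart : start ∈ pvIter d (N+1) [start] :=
    pvSubset_iter d (N+1) [start] start (List.mem_singleton.mpr rfl)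
  exact main (N+1) [] start hstart (by simp) List.nodup_nil (by simp) (by simp)

theorem pvExpand_total (rule_set : List (Int × String)) (rule_num : Int)
    (h : Pre_gen_regex rule_set rule_num) :
    ∃ r, pvExpand (PySem.Dict.ofList rule_set) (rule_set.length + 1) rule_num = some r := by
  unfold Pre_gen_regex at h
  simp only [Bool.and_eq_true, List.all_eq_true, Bool.not_eq_true'] at h
  obtain ⟨hsome, hall⟩ := h
  have hwf : ∀ k ∈ pvIter (PySem.Dict.ofList rule_set) (rule_set.length + 1) [rule_num],
      pvWfB (PySem.Dict.ofList rule_set) k = true := fun k hk => (hall k hk).1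
  have hacyc : ∀ k ∈ pvIter (PySem.Dict.ofList rule_set) (rule_set.length + 1) [rule_num],
      k ∉ pvIter (PySem.Dict.ofList rule_set) (rule_set.length + 1)
            (pvSuccs (PySem.Dict.ofList rule_set) k) := by
    intro k hk hc
    have h2 := (hall k hk).2
    rw [List.contains_eq_mem] at h2
    simp [hc] at h2
  have hKcard : ((rule_set.map Prod.fst).toFinset).card ≤ rule_set.length :=
    le_trans (List.toFinset_card_le _) (by simp)
  have hkeyK : ∀ (k : Int) (v : String), (PySem.Dict.ofList rule_set).get? k = some v →
      k ∈ (rule_set.map Prod.fst).toFinset :=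
    fun k v hv => List.mem_toFinset.mpr (pvGet?_ofList_mem rule_set k v hv)
  have := pvExpand_total_aux (PySem.Dict.ofList rule_set) rule_set.length
    ((rule_set.map Prod.fst).toFinset) hKcard hkeyK rule_num hwf hacyc
  exact Option.isSome_iff_exists.mp this

-- ===== VERDICT (by name: the statement is the Claim_ definition above) =====
theorem gen_regex_spec : Claim_equal_gen_regex := by
  intro rule_set rule_num _ hpre
  unfold Spec_gen_regex
  obtain ⟨r, hr⟩ := pvExpand_total rule_set rule_num hpre
  obtain ⟨memo', hh, -⟩ := pvAB (PySem.Dict.ofList rule_set) (rule_set.length + 1)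
    rule_num none r (by simpa using pvInv_empty _) hr
  unfold gen_regex gen_regex_alt
  rw [hh, hr]
  rfl
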